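-- pv_equiv track=rewrite | github.com/sarahhannahwu/benchmarking-creativity | analysis/functions/tools.py | get_unique_decominoes
-- ===== SOURCE A (Python) =====
-- def encode_shape_binaries(shape, bits=10):
--     """
--     Encodes a 2D list (shape) of 0/1 bits into a single string of
--     space-separated decimal codes. Each row in the shape becomes one code.
--
--     :param shape: A list of lists, where each sub-list is a row of bits (0's and 1's).
--     :param bits: The fixed width of the binary representation (default=10).
--     :return: A single string with space-separated decimal values
--              (e.g., "1016 64 64 64").
--     """
--     codes = []
--     for row in shape:
--         if 1 not in row:
--             continue
--         # Convert the list of bits into a binary string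
--         binary_str = ''.join([str(bit) for bit in row])
--
--         # Convert the binary string into an integer
--         number = int(binary_str, 2)
--
--         codes.append(str(number))
--
--     return ' '.join(codes)
--
-- def tuple_polyomino_to_grid(tuple_polyomino):
--     min_x = min([x for (x,y) in tuple_polyomino])
--     min_y = min([y for (x,y) in tuple_polyomino])
--     tuple_polyomino = [(x - min_x, y - min_y) for (x,y) in tuple_polyomino]
--     grid = [[0 for i in range(10)] for j in range(10)]
--     for (x,y) in tuple_polyomino:
--         grid[x][y] = 1 # change to [y][x] if you want the shape top-justified
--     return grid
--
-- def get_rotations(decomino):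
--     rotate = lambda decomino: [(y,-x) for (x,y) in decomino]
--     rotations = []
--     for _ in range(4):
--         decomino = rotate(decomino)
--         rotations.append(decomino)
--     return rotations
--
-- def get_reflections(decomino):
--     return [[(-x,y) for (x,y) in decomino], [(x,-y) for (x,y) in decomino]]
--
-- def get_unique_decominoes(decominoes):
--     unique_decominoes = set()
--     for decomino in decominoes:
--         transformations = [] # A list of tuple representations of the decomino's rotations and reflections
--         for rotation in get_rotations(decomino):
--             transformations.append(rotation)
--             for reflection in get_reflections(rotation):
--                 transformations.append(reflection)
--         transformations_grids = map(tuple_polyomino_to_grid, transformations)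
--         transformation_encodings_set = set(map(encode_shape_binaries, transformations_grids))
--         if not transformation_encodings_set.intersection(unique_decominoes): # Transform every possible way and check if any of them are already in the set
--             unique_decominoes.add(encode_shape_binaries(tuple_polyomino_to_grid(decomino)))
--     return unique_decominoes
-- ===== SOURCE B (Python) =====
-- # B: two-pass sieve with an inverted index (pass 1: encode each shape's 8
-- # dihedral variants straight from its coordinates, no 10x10 grid, and index
-- # encoding -> shape indices; pass 2: keep a shape unless already marked, and on
-- # keeping mark every later shape sharing its representative encoding).
--
-- def _encode(cells):
--     min_x = min(x for x, _ in cells)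
--     min_y = min(y for _, y in cells)
--     rows = {}
--     for x, y in cells:
--         rows.setdefault(x - min_x, set()).add(y - min_y)
--     return ' '.join(
--         str(int(''.join('1' if y in rows[x] else '0' for y in range(10)), 2))
--         for x in sorted(rows))
--
-- def _variants(cells):
--     return [
--         list(cells),
--         [(y, -x) for (x, y) in cells],
--         [(-x, -y) for (x, y) in cells],
--         [(-y, x) for (x, y) in cells],
--         [(-x, y) for (x, y) in cells],
--         [(y, x) for (x, y) in cells],
--         [(x, -y) for (x, y) in cells],
--         [(-y, -x) for (x, y) in cells],
--     ]
--
-- def _encodings(cells):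
--     return [_encode(v) for v in _variants(cells)]
--
-- def get_unique_decominoes(decominoes):
--     reps = []
--     index = {}
--     for j, cells in enumerate(decominoes):
--         encs = set(_encodings(cells))
--         reps.append(_encode(cells))
--         for e in encs:
--             index.setdefault(e, []).append(j)
--     killed = set()
--     out = set()
--     for i, rep in enumerate(reps):
--         if i not in killed:
--             out.add(rep)
--             killed.update(j for j in index[rep] if j > i)
--     return out
-- ===== Notes on version B (the rewrite author's own statement) =====
-- stated objective: alternative
-- what changed: B replaces A's one-pass dedup (build each shape's 12 rotation/reflection grids, encode them through a 10x10 grid, and set-intersect against the accumulated representatives) with a two-pass sieve: pass 1 encodes the 8 dihedral variants directly from normalized coordinates (no grid) and builds an inverted index from encoding to shape indices; pass 2 scans indices, keeps a shape unless previously marked, and on keeping marks every later index sharing the kept representative encoding.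
import Mathlib
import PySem

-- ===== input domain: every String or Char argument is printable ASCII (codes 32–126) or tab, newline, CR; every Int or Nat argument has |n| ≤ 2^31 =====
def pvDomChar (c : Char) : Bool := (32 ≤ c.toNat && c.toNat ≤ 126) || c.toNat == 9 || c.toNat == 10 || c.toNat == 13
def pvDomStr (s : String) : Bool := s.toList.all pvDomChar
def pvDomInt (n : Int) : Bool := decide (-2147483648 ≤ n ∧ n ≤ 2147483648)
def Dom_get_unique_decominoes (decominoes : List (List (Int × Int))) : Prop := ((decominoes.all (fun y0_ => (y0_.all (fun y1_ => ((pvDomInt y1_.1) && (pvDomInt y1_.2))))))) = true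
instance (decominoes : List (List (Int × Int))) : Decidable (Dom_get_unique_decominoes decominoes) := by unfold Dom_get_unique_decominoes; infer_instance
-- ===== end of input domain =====

-- B replaces A's one-pass intersection dedup by a two-pass sieve: pass 1 encodes the 8
-- dihedral variants directly from coordinates (no 10x10 grid) and builds an inverted
-- index encoding -> shape indices; pass 2 keeps a shape unless marked and, on keeping,
-- marks every later index sharing the kept representative encoding.

-- ===== PORT A =====
def encode_shape_binaries (shape : List (List Int)) : String :=
  let codes := shape.foldl (fun codes row =>
    if (1 : Int) ∈ row then
      let binary_str := PySem.Str.join "" (row.map (fun bit => PySem.Int.toStr bit))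
      -- int(binary_str, 2): the rows A passes here are nonempty 0/1 bit rows, so the parse always succeeds
      let number := (PySem.Int.ofStrBase? binary_str 2).getD 0
      codes ++ [PySem.Int.toStr number]
    else codes) []
  PySem.Str.join " " codes

def tuple_polyomino_to_grid (tp : List (Int × Int)) : List (List Int) :=
  -- min() of an empty list raises ValueError; Pre_ excludes empty decominoes, so the .getD 0 is never used
  let min_x := (PySem.List.min? (tp.map (fun p => p.1)) (fun x => x)).getD 0
  let min_y := (PySem.List.min? (tp.map (fun p => p.2)) (fun x => x)).getD 0
  let tp2 := tp.map (fun p => (p.1 - min_x, p.2 - min_y))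
  let grid : List (List Int) :=
    (PySem.List.pyRange 0 10 1).map (fun _ => (PySem.List.pyRange 0 10 1).map (fun _ => (0 : Int)))
  -- grid[x][y] = 1 raises IndexError when a normalized coordinate is ≥ 10; Pre_ excludes that
  tp2.foldl (fun grid p =>
    PySem.List.pySetD grid p.1 (PySem.List.pySetD (PySem.List.pyGetD grid p.1 []) p.2 1)) grid

def get_rotations (decomino : List (Int × Int)) : List (List (Int × Int)) :=
  let st := (List.range 4).foldl (fun (st : List (Int × Int) × List (List (Int × Int))) _ =>
    let d := st.1.map (fun p => (p.2, -p.1))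
    (d, st.2 ++ [d])) (decomino, [])
  st.2

def get_reflections (decomino : List (Int × Int)) : List (List (Int × Int)) :=
  [decomino.map (fun p => (-p.1, p.2)), decomino.map (fun p => (p.1, -p.2))]

def get_unique_decominoes (decominoes : List (List (Int × Int))) : List String :=
  decominoes.foldl (fun unique decomino =>
    let transformations := (get_rotations decomino).foldl (fun ts rotation =>
      (get_reflections rotation).foldl (fun ts reflection => ts ++ [reflection]) (ts ++ [rotation])) []
    let encs := PySem.Set.ofList
      (transformations.map (fun t => encode_shape_binaries (tuple_polyomino_to_grid t)))
    if PySem.Set.inter encs unique = [] then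
      PySem.Set.add unique (encode_shape_binaries (tuple_polyomino_to_grid decomino))
    else unique) PySem.Set.empty

-- ===== PORT B =====
def pvEncB (cells : List (Int × Int)) : String :=
  let min_x := (PySem.List.min? (cells.map (fun p => p.1)) (fun x => x)).getD 0
  let min_y := (PySem.List.min? (cells.map (fun p => p.2)) (fun x => x)).getD 0
  let rows : PySem.Dict Int (PySem.Set Int) := cells.foldl (fun rows p =>
    rows.modify (p.1 - min_x) PySem.Set.empty (fun s => PySem.Set.add s (p.2 - min_y))) PySem.Dict.empty
  PySem.Str.join " " ((PySem.List.sorted rows.keys (fun k => k)).map (fun x =>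
    PySem.Int.toStr ((PySem.Int.ofStrBase? (PySem.Str.join "" ((PySem.List.pyRange 0 10 1).map (fun y =>
      if (rows.getD x PySem.Set.empty).contains y then "1" else "0"))) 2).getD 0)))

def pvVariants (cells : List (Int × Int)) : List (List (Int × Int)) :=
  [cells,
   cells.map (fun p => (p.2, -p.1)),
   cells.map (fun p => (-p.1, -p.2)),
   cells.map (fun p => (-p.2, p.1)),
   cells.map (fun p => (-p.1, p.2)),
   cells.map (fun p => (p.2, p.1)),
   cells.map (fun p => (p.1, -p.2)),
   cells.map (fun p => (-p.2, -p.1))]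

def pvE8 (cells : List (Int × Int)) : List String := (pvVariants cells).map pvEncB

def get_unique_decominoes_alt (decominoes : List (List (Int × Int))) : List String :=
  -- pass 1: reps[j] = encoding of shape j, index: encoding -> indices of shapes having it among their 8 variants
  let st1 := (PySem.List.enumerate decominoes).foldl
    (fun (st : List String × PySem.Dict String (List Int)) jc =>
      let encs : PySem.Set String := PySem.Set.ofList (pvE8 jc.2)
      (st.1 ++ [pvEncB jc.2],
       encs.foldl (fun idx e => idx.modify e [] (fun l => l ++ [jc.1])) st.2))
    ([], PySem.Dict.empty)
  -- pass 2: sieve; index[rep] is always present (the identity variant), so getD is exact here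
  let st2 := (PySem.List.enumerate st1.1).foldl
    (fun (st : PySem.Set Int × PySem.Set String) ir =>
      if !(PySem.Set.contains st.1 ir.1) then
        (PySem.Set.update st.1 ((st1.2.getD ir.2 []).filter (fun j => decide (j > ir.1))),
         PySem.Set.add st.2 ir.2)
      else st)
    (PySem.Set.empty, PySem.Set.empty)
  st2.2

-- ===== PRECONDITION & SPEC =====
-- A raises ValueError (min of an empty list) on an empty decomino and IndexError when a
-- decomino spans more than 10 cells in either axis (grid[x][y] out of range); Pre_ excludes exactly those.
def Pre_get_unique_decominoes (decominoes : List (List (Int × Int))) : Prop :=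
  ∀ d ∈ decominoes, d ≠ [] ∧ ∀ p ∈ d, ∀ q ∈ d, p.1 - q.1 ≤ 9 ∧ p.2 - q.2 ≤ 9
instance (decominoes : List (List (Int × Int))) : Decidable (Pre_get_unique_decominoes decominoes) := by
  unfold Pre_get_unique_decominoes; infer_instance

def pvWitness_get_unique_decominoes : (List (List (Int × Int))) :=
  [[(0, 0), (1, 0), (2, 0)], [(5, 5), (5, 6), (6, 5)], [(0, 0), (0, 1), (0, 2)]]

def Spec_get_unique_decominoes (decominoes : List (List (Int × Int))) (out : List String) : Prop := out = get_unique_decominoes_alt decominoes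
instance (decominoes : List (List (Int × Int))) (out : List String) : Decidable (Spec_get_unique_decominoes decominoes out) := by unfold Spec_get_unique_decominoes; infer_instance

-- ===== CLAIM (what is proved, stated in full; the proofs are below) =====
def Claim_equal_get_unique_decominoes : Prop := ∀ (decominoes : List (List (Int × Int))), Dom_get_unique_decominoes decominoes → Pre_get_unique_decominoes decominoes → Spec_get_unique_decominoes decominoes (get_unique_decominoes decominoes)

-- ===== LEMMAS AND PROOFS =====
def pvGrid (f : Int → Int → Bool) : List (List Int) :=
  (PySem.List.pyRange 0 10 1).map (fun x => (PySem.List.pyRange 0 10 1).map (fun y => if f x y then 1 else 0))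

lemma pvGrid_congr {f g : Int → Int → Bool} (h : ∀ x y, f x y = g x y) : pvGrid f = pvGrid g := by
  unfold pvGrid
  refine List.map_congr_left (fun x _ => List.map_congr_left (fun y _ => by rw [h]))

lemma set_map_pyRange {β : Type} (h : Int → β) (n : Nat) (b : Int) (v : β)
    (hb0 : 0 ≤ b) :
    ((PySem.List.pyRange 0 (n : Int) 1).map h).set b.toNat v
      = (PySem.List.pyRange 0 (n : Int) 1).map (fun y => if y = b then v else h y) := by
  rw [PySem.List.pyRange_zero_natCast]
  apply List.ext_getElem
  · simp
  · intro i h1 h2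
    simp only [List.length_map, List.length_set, List.length_range] at h1
    simp [List.getElem_set, List.getElem_map, List.getElem_range]
    rcases eq_or_ne i b.toNat with h | h
    · subst h; simp [Int.toNat_of_nonneg hb0]
    · have hne : ¬ ((i : Int) = b) := by omega
      simp [hne]
      intro h'; omega

lemma grid_step (f : Int → Int → Bool) (a b : Int)
    (ha0 : 0 ≤ a) (ha : a < 10) (hb0 : 0 ≤ b) (hb : b < 10) :
    PySem.List.pySetD (pvGrid f) a
      (PySem.List.pySetD (PySem.List.pyGetD (pvGrid f) a []) b 1)
      = pvGrid (fun x y => f x y || (decide (x = a) && decide (y = b))) := by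
  unfold pvGrid
  rw [PySem.List.pyGetD_map_pyRange_of_nonneg _ 10 a _ ha0 ha]
  rw [PySem.List.pySetD_of_nonneg _ _ hb0, PySem.List.pySetD_of_nonneg _ _ ha0]
  have h10 : ((10:Nat) : Int) = (10:Int) := by norm_num
  rw [← h10, set_map_pyRange _ 10 b 1 hb0, set_map_pyRange _ 10 a _ ha0, h10]
  refine List.map_congr_left (fun x hx => ?_)
  rcases eq_or_ne x a with rfl | hxa
  · rw [if_pos rfl]
    refine List.map_congr_left (fun y hy => ?_)
    rcases eq_or_ne y b with rfl | hyb
    · simp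
    · simp [hyb]
  · simp only [if_neg hxa]
    refine List.map_congr_left (fun y hy => ?_)
    simp [hxa]

lemma grid_fold (l : List (Int × Int)) (f : Int → Int → Bool)
    (hl : ∀ r ∈ l, 0 ≤ r.1 ∧ r.1 < 10 ∧ 0 ≤ r.2 ∧ r.2 < 10) :
    l.foldl (fun grid p =>
        PySem.List.pySetD grid p.1 (PySem.List.pySetD (PySem.List.pyGetD grid p.1 []) p.2 1)) (pvGrid f)
      = pvGrid (fun x y => f x y || decide ((x, y) ∈ l)) := by
  induction l generalizing f with
  | nil => exact pvGrid_congr (by simp)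
  | cons p t ih =>
    obtain ⟨h1, h2, h3, h4⟩ := hl p (by simp)
    simp only [List.foldl_cons]
    rw [grid_step f p.1 p.2 h1 h2 h3 h4]
    rw [ih _ (fun r hr => hl r (by simp [hr]))]
    refine pvGrid_congr (fun x y => ?_)
    cases f x y <;> simp [List.mem_cons, Prod.ext_iff]

lemma rows_getD (l : List (Int × Int)) (d : PySem.Dict Int (PySem.Set Int)) (c y : Int) :
    y ∈ (l.foldl (fun d (p : Int × Int) => d.modify p.1 PySem.Set.empty (fun s => PySem.Set.add s p.2)) d).getD c PySem.Set.empty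
      ↔ y ∈ d.getD c PySem.Set.empty ∨ (c, y) ∈ l := by
  induction l generalizing d with
  | nil => simp
  | cons p t ih =>
    simp only [List.foldl_cons, ih, PySem.Dict.getD_modify]
    rcases eq_or_ne c p.1 with rfl | hne
    · simp [PySem.Set.mem_add, Prod.ext_iff]; try tauto
    · simp [hne, Prod.ext_iff]; try tauto

def pvB9 (cells : List (Int × Int)) : Prop :=
  ∀ p ∈ cells, ∀ q ∈ cells, p.1 - q.1 ≤ 9 ∧ p.2 - q.2 ≤ 9

lemma one_mem_bits (l : List Int) (f : Int → Bool) :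
    ((1:Int) ∈ l.map (fun y => if f y then (1:Int) else 0)) ↔ ∃ y ∈ l, f y = true := by
  simp only [List.mem_map]
  constructor
  · rintro ⟨y, hy, h⟩
    by_cases hf : f y
    · exact ⟨y, hy, hf⟩
    · simp [hf] at h
  · rintro ⟨y, hy, hf⟩
    exact ⟨y, hy, by simp [hf]⟩

lemma enc_eq (cells : List (Int × Int)) (hne : cells ≠ []) (hb : pvB9 cells) :
    encode_shape_binaries (tuple_polyomino_to_grid cells) = pvEncB cells := by
  -- the two minima
  obtain ⟨mx, hmx⟩ : ∃ m, PySem.List.min? (cells.map (fun p => p.1)) (fun x => x) = some m := by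
    rcases h : PySem.List.min? (cells.map (fun p => p.1)) (fun x => x) with _ | m
    · rw [PySem.List.min?_eq_none_iff] at h; simp at h; exact absurd h hne
    · exact ⟨m, h⟩
  obtain ⟨my, hmy⟩ : ∃ m, PySem.List.min? (cells.map (fun p => p.2)) (fun x => x) = some m := by
    rcases h : PySem.List.min? (cells.map (fun p => p.2)) (fun x => x) with _ | m
    · rw [PySem.List.min?_eq_none_iff] at h; simp at h; exact absurd h hne
    · exact ⟨m, h⟩
  have hmx_mem := PySem.List.min?_mem hmx
  have hmy_mem := PySem.List.min?_mem hmy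
  have hmx_min := PySem.List.min?_isMin hmx
  have hmy_min := PySem.List.min?_isMin hmy
  simp only [List.mem_map] at hmx_mem hmy_mem
  obtain ⟨qx, hqx, hqx'⟩ := hmx_mem
  obtain ⟨qy, hqy, hqy'⟩ := hmy_mem
  set norm : List (Int × Int) := cells.map (fun p => (p.1 - mx, p.2 - my)) with hnormdef
  have hnorm : ∀ r ∈ norm, 0 ≤ r.1 ∧ r.1 < 10 ∧ 0 ≤ r.2 ∧ r.2 < 10 := by
    intro r hr
    rw [hnormdef] at hr
    simp only [List.mem_map] at hr
    obtain ⟨p, hp, rfl⟩ := hr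
    have h1 := hmx_min p.1 (List.mem_map_of_mem hp)
    have h2 := hmy_min p.2 (List.mem_map_of_mem hp)
    have h3 := (hb p hp qx hqx).1
    have h4 := (hb p hp qy hqy).2
    simp only at h1 h2
    constructor; · omega
    refine ⟨by omega, by omega, by omega⟩
  -- A's grid is the membership grid of the normalized cells
  have hgrid : tuple_polyomino_to_grid cells = pvGrid (fun x y => decide ((x, y) ∈ norm)) := by
    simp only [tuple_polyomino_to_grid, hmx, hmy, Option.getD_some, ← hnormdef]
    have h0 : ((PySem.List.pyRange 0 10 1).map (fun _ => (PySem.List.pyRange 0 10 1).map (fun _ => (0 : Int))))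
        = pvGrid (fun _ _ => false) := rfl
    rw [h0, grid_fold norm _ hnorm]
    exact pvGrid_congr (fun x y => by simp)
  have hget : ∀ x y : Int,
      ((cells.foldl (fun d (p : Int × Int) => d.modify (p.1 - mx) PySem.Set.empty
          (fun s => PySem.Set.add s (p.2 - my))) PySem.Dict.empty).getD x PySem.Set.empty).contains y
        = decide ((x, y) ∈ norm) := by
    intro x y
    have hfold : cells.foldl (fun d (p : Int × Int) => d.modify (p.1 - mx) PySem.Set.empty
          (fun s => PySem.Set.add s (p.2 - my))) PySem.Dict.empty
        = norm.foldl (fun d (r : Int × Int) => d.modify r.1 PySem.Set.empty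
          (fun s => PySem.Set.add s r.2)) PySem.Dict.empty := by
      rw [hnormdef, List.foldl_map]
    rw [hfold]
    have hmem := rows_getD norm PySem.Dict.empty x y
    have hemp : ((PySem.Dict.empty : PySem.Dict Int (PySem.Set Int)).getD x PySem.Set.empty) = [] := rfl
    rw [hemp] at hmem
    simp only [List.not_mem_nil, false_or] at hmem
    by_cases hm : (x, y) ∈ norm
    · simp only [hm, decide_true]
      rw [PySem.Set.contains_iff]
      exact hmem.mpr hm
    · simp only [hm, decide_false]
      rw [← Bool.not_eq_true, PySem.Set.contains_iff]
      exact fun h => hm (hmem.mp h)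
  have hkeys : (cells.foldl (fun d (p : Int × Int) => d.modify (p.1 - mx) PySem.Set.empty
          (fun s => PySem.Set.add s (p.2 - my))) PySem.Dict.empty).keys
        = PySem.Set.ofList (norm.map Prod.fst) := by
    have h2 : (cells.foldl (fun d (p : Int × Int) => d.modify (p.1 - mx) PySem.Set.empty
          (fun s => PySem.Set.add s (p.2 - my))) PySem.Dict.empty).keys
        = PySem.Set.update (PySem.Dict.empty : PySem.Dict Int (PySem.Set Int)).keys
            (cells.map (fun p : Int × Int => p.1 - mx)) :=
      PySem.Dict.keys_foldl_modify_key cells (fun p : Int × Int => p.1 - mx)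
        (PySem.Set.empty : PySem.Set Int) (fun _ p => fun s => PySem.Set.add s (p.2 - my))
        PySem.Dict.empty
    rw [h2, hnormdef, List.map_map]
    rfl
  have hXbound : ∀ a ∈ norm.map Prod.fst, 0 ≤ a ∧ a < 10 := by
    intro a ha
    simp only [List.mem_map] at ha
    obtain ⟨r, hr, rfl⟩ := ha
    exact ⟨(hnorm r hr).1, (hnorm r hr).2.1⟩
  have hsorted : PySem.List.sorted ((cells.foldl (fun d (p : Int × Int) => d.modify (p.1 - mx) PySem.Set.empty
          (fun s => PySem.Set.add s (p.2 - my))) PySem.Dict.empty).keys) (fun k => k)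
        = (PySem.List.pyRange 0 10 1).filter (fun x => decide (x ∈ norm.map Prod.fst)) := by
    rw [hkeys]
    apply PySem.List.sorted_eq_of_perm_of_pairwise_lt
    · rw [List.perm_ext_iff_of_nodup
        (List.Nodup.filter _ (by decide : (PySem.List.pyRange 0 10 1).Nodup))
        (PySem.Set.nodup_ofList _)]
      intro a
      simp only [List.mem_filter, PySem.Set.mem_ofList, PySem.List.mem_pyRange_one, decide_eq_true_eq]
      constructor
      · exact fun h => h.2
      · exact fun h => ⟨⟨(hXbound a h).1, (hXbound a h).2⟩, h⟩
    · exact List.Pairwise.filter _ (by decide)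
  -- reduce both sides
  simp only [encode_shape_binaries, pvEncB, hmx, hmy, Option.getD_some, hgrid, hsorted, hget]
  simp only [pvGrid]
  rw [PySem.List.foldl_append_ite (fun row : List Int => (1 : Int) ∈ row)
    (fun row : List Int => PySem.Int.toStr ((PySem.Int.ofStrBase?
      (PySem.Str.join "" (List.map (fun bit => PySem.Int.toStr bit) row)) 2).getD 0))]
  rw [List.nil_append, List.filter_map, List.map_map]
  refine congrArg (PySem.Str.join " ") ?_
  rw [List.filter_congr (fun x _ => ?_)]
  · refine List.map_congr_left (fun x _ => ?_)
    simp only [Function.comp_apply, List.map_map]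
    refine congrArg (fun s => PySem.Int.toStr ((PySem.Int.ofStrBase? (PySem.Str.join "" s) 2).getD 0)) ?_
    refine List.map_congr_left (fun y _ => ?_)
    simp only [Function.comp_apply]
    by_cases hm : (x, y) ∈ norm
    · simp [hm]; rfl
    · simp [hm]; rfl
  · simp only [Function.comp_apply]
    rw [decide_eq_decide]
    rw [one_mem_bits]
    constructor
    · rintro ⟨y, hy, hd⟩
      simp only [decide_eq_true_eq] at hd
      exact List.mem_map.mpr ⟨(x, y), hd, rfl⟩
    · intro hx
      obtain ⟨r, hr, rfl⟩ := List.mem_map.mp hx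
      obtain ⟨_, _, h3, h4⟩ := hnorm r hr
      refine ⟨r.2, PySem.List.mem_pyRange_one.mpr ⟨h3, h4⟩, by simpa using hr⟩

lemma pvB9_map (d : List (Int × Int)) (g : (Int × Int) → (Int × Int))
    (hg : ∀ p q, p ∈ d → q ∈ d → (g p).1 - (g q).1 ≤ 9 ∧ (g p).2 - (g q).2 ≤ 9) :
    pvB9 (d.map g) := by
  intro p hp q hq
  simp only [List.mem_map] at hp hq
  obtain ⟨a, ha, rfl⟩ := hp
  obtain ⟨b, hbm, rfl⟩ := hq
  exact hg a b ha hbm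

lemma map_ne_nil {d : List (Int × Int)} (g : (Int × Int) → (Int × Int)) (h : d ≠ []) :
    d.map g ≠ [] := by simp [h]

lemma cond_equiv (u l12 l8 : List String) (hmem : ∀ e, e ∈ l12 ↔ e ∈ l8) :
    (PySem.Set.inter (PySem.Set.ofList l12) u = []) ↔ (l8.all (fun e => !(PySem.Set.contains u e)) = true) := by
  have h1 : (PySem.Set.inter (PySem.Set.ofList l12) u = []) ↔ ∀ e ∈ l12, e ∉ u := by
    show (List.filter (fun x => PySem.Set.contains u x) (PySem.Set.ofList l12) = []) ↔ _
    rw [List.filter_eq_nil_iff]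
    simp [PySem.Set.mem_ofList]
  have h2 : (l8.all (fun e => !(PySem.Set.contains u e)) = true) ↔ ∀ e ∈ l8, e ∉ u := by
    rw [List.all_eq_true]
    simp
  rw [h1, h2]
  exact ⟨fun h e he => h e ((hmem e).mpr he), fun h e he => h e ((hmem e).mp he)⟩

lemma pv_if_congr {α : Type} (c1 : Prop) [Decidable c1] (c2 : Bool) (h : c1 ↔ c2 = true) (x y : α) :
    (if c1 then x else y) = (if c2 then x else y) := by
  by_cases hc : c1
  · rw [if_pos hc, if_pos (h.mp hc)]
  · rw [if_neg hc, if_neg (fun hb => hc (h.mpr hb))]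

-- middle form: A's loop rewritten over B's encoder and the 8 closed-form variants
def pvMid (ds : List (List (Int × Int))) : List String :=
  ds.foldl (fun u d =>
    if (pvE8 d).all (fun e => !(PySem.Set.contains u e)) then PySem.Set.add u (pvEncB d) else u)
    PySem.Set.empty

set_option maxHeartbeats 2000000 in
lemma A_eq_mid (ds : List (List (Int × Int))) (hpre : Pre_get_unique_decominoes ds) :
    get_unique_decominoes ds = pvMid ds := by
  unfold get_unique_decominoes pvMid
  refine PySem.List.foldl_congr_mem' ds _ _ _ (fun d hd u => ?_)
  obtain ⟨hne, hb⟩ := hpre d hd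
  have hb' : pvB9 d := hb
  simp only []
  have htrans : get_rotations d = [d.map (fun p => (p.2, -p.1)),
      (d.map (fun p => (p.2, -p.1))).map (fun p => (p.2, -p.1)),
      ((d.map (fun p => (p.2, -p.1))).map (fun p => (p.2, -p.1))).map (fun p => (p.2, -p.1)),
      (((d.map (fun p => (p.2, -p.1))).map (fun p => (p.2, -p.1))).map (fun p => (p.2, -p.1))).map (fun p => (p.2, -p.1))] := rfl
  rw [htrans]
  simp only [get_reflections, List.foldl_cons, List.foldl_nil, List.nil_append,
    List.cons_append, List.map_cons, List.map_nil]
  have m1x : (d.map (fun p : Int × Int => (p.2, -p.1))).map (fun p : Int × Int => (-p.1, p.2))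
      = d.map (fun p : Int × Int => (-p.2, -p.1)) := by
    rw [List.map_map]; exact List.map_congr_left (fun p _ => by simp)
  have m1y : (d.map (fun p : Int × Int => (p.2, -p.1))).map (fun p : Int × Int => (p.1, -p.2))
      = d.map (fun p : Int × Int => (p.2, p.1)) := by
    rw [List.map_map]; exact List.map_congr_left (fun p _ => by simp)
  have m2 : (d.map (fun p : Int × Int => (p.2, -p.1))).map (fun p : Int × Int => (p.2, -p.1))
      = d.map (fun p : Int × Int => (-p.1, -p.2)) := by
    rw [List.map_map]; exact List.map_congr_left (fun p _ => by simp)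
  have m2x : (d.map (fun p : Int × Int => (-p.1, -p.2))).map (fun p : Int × Int => (-p.1, p.2))
      = d.map (fun p : Int × Int => (p.1, -p.2)) := by
    rw [List.map_map]; exact List.map_congr_left (fun p _ => by simp)
  have m2y : (d.map (fun p : Int × Int => (-p.1, -p.2))).map (fun p : Int × Int => (p.1, -p.2))
      = d.map (fun p : Int × Int => (-p.1, p.2)) := by
    rw [List.map_map]; exact List.map_congr_left (fun p _ => by simp)
  have m3 : (d.map (fun p : Int × Int => (-p.1, -p.2))).map (fun p : Int × Int => (p.2, -p.1))
      = d.map (fun p : Int × Int => (-p.2, p.1)) := by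
    rw [List.map_map]; exact List.map_congr_left (fun p _ => by simp)
  have m3x : (d.map (fun p : Int × Int => (-p.2, p.1))).map (fun p : Int × Int => (-p.1, p.2))
      = d.map (fun p : Int × Int => (p.2, p.1)) := by
    rw [List.map_map]; exact List.map_congr_left (fun p _ => by simp)
  have m3y : (d.map (fun p : Int × Int => (-p.2, p.1))).map (fun p : Int × Int => (p.1, -p.2))
      = d.map (fun p : Int × Int => (-p.2, -p.1)) := by
    rw [List.map_map]; exact List.map_congr_left (fun p _ => by simp)
  have m4 : (d.map (fun p : Int × Int => (-p.2, p.1))).map (fun p : Int × Int => (p.2, -p.1))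
      = d := by
    rw [List.map_map]; refine (List.map_congr_left (fun p _ => by simp)).trans (List.map_id _)
  have enc1 : encode_shape_binaries (tuple_polyomino_to_grid d) = pvEncB d := enc_eq d hne hb'
  have enc2 : encode_shape_binaries (tuple_polyomino_to_grid (d.map (fun p : Int × Int => (p.2, -p.1))))
      = pvEncB (d.map (fun p : Int × Int => (p.2, -p.1))) :=
    enc_eq _ (map_ne_nil _ hne) (pvB9_map d _ (fun p q hp hq => by
      have h1 := hb' p hp q hq; have h2 := hb' q hq p hp
      constructor <;> simp <;> omega))
  have enc3 : encode_shape_binaries (tuple_polyomino_to_grid (d.map (fun p : Int × Int => (-p.1, -p.2))))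
      = pvEncB (d.map (fun p : Int × Int => (-p.1, -p.2))) :=
    enc_eq _ (map_ne_nil _ hne) (pvB9_map d _ (fun p q hp hq => by
      have h1 := hb' p hp q hq; have h2 := hb' q hq p hp
      constructor <;> simp <;> omega))
  have enc4 : encode_shape_binaries (tuple_polyomino_to_grid (d.map (fun p : Int × Int => (-p.2, p.1))))
      = pvEncB (d.map (fun p : Int × Int => (-p.2, p.1))) :=
    enc_eq _ (map_ne_nil _ hne) (pvB9_map d _ (fun p q hp hq => by
      have h1 := hb' p hp q hq; have h2 := hb' q hq p hp
      constructor <;> simp <;> omega))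
  have enc5 : encode_shape_binaries (tuple_polyomino_to_grid (d.map (fun p : Int × Int => (-p.1, p.2))))
      = pvEncB (d.map (fun p : Int × Int => (-p.1, p.2))) :=
    enc_eq _ (map_ne_nil _ hne) (pvB9_map d _ (fun p q hp hq => by
      have h1 := hb' p hp q hq; have h2 := hb' q hq p hp
      constructor <;> simp <;> omega))
  have enc6 : encode_shape_binaries (tuple_polyomino_to_grid (d.map (fun p : Int × Int => (p.2, p.1))))
      = pvEncB (d.map (fun p : Int × Int => (p.2, p.1))) :=
    enc_eq _ (map_ne_nil _ hne) (pvB9_map d _ (fun p q hp hq => by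
      have h1 := hb' p hp q hq; have h2 := hb' q hq p hp
      constructor <;> simp <;> omega))
  have enc7 : encode_shape_binaries (tuple_polyomino_to_grid (d.map (fun p : Int × Int => (p.1, -p.2))))
      = pvEncB (d.map (fun p : Int × Int => (p.1, -p.2))) :=
    enc_eq _ (map_ne_nil _ hne) (pvB9_map d _ (fun p q hp hq => by
      have h1 := hb' p hp q hq; have h2 := hb' q hq p hp
      constructor <;> simp <;> omega))
  have enc8 : encode_shape_binaries (tuple_polyomino_to_grid (d.map (fun p : Int × Int => (-p.2, -p.1))))
      = pvEncB (d.map (fun p : Int × Int => (-p.2, -p.1))) :=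
    enc_eq _ (map_ne_nil _ hne) (pvB9_map d _ (fun p q hp hq => by
      have h1 := hb' p hp q hq; have h2 := hb' q hq p hp
      constructor <;> simp <;> omega))
  simp only [pvE8, pvVariants, List.map_cons, List.map_nil,
    m1x, m1y, m2, m2x, m2y, m3, m3x, m3y, m4, enc1, enc2, enc3, enc4, enc5, enc6, enc7, enc8]
  have hmem : ∀ e : String,
      e ∈ [pvEncB (d.map (fun p : Int × Int => (p.2, -p.1))),
           pvEncB (d.map (fun p : Int × Int => (-p.2, -p.1))),
           pvEncB (d.map (fun p : Int × Int => (p.2, p.1))),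
           pvEncB (d.map (fun p : Int × Int => (-p.1, -p.2))),
           pvEncB (d.map (fun p : Int × Int => (p.1, -p.2))),
           pvEncB (d.map (fun p : Int × Int => (-p.1, p.2))),
           pvEncB (d.map (fun p : Int × Int => (-p.2, p.1))),
           pvEncB (d.map (fun p : Int × Int => (p.2, p.1))),
           pvEncB (d.map (fun p : Int × Int => (-p.2, -p.1))),
           pvEncB d,
           pvEncB (d.map (fun p : Int × Int => (-p.1, p.2))),
           pvEncB (d.map (fun p : Int × Int => (p.1, -p.2)))]
      ↔ e ∈ [pvEncB d,
           pvEncB (d.map (fun p : Int × Int => (p.2, -p.1))),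
           pvEncB (d.map (fun p : Int × Int => (-p.1, -p.2))),
           pvEncB (d.map (fun p : Int × Int => (-p.2, p.1))),
           pvEncB (d.map (fun p : Int × Int => (-p.1, p.2))),
           pvEncB (d.map (fun p : Int × Int => (p.2, p.1))),
           pvEncB (d.map (fun p : Int × Int => (p.1, -p.2))),
           pvEncB (d.map (fun p : Int × Int => (-p.2, -p.1)))] := by
    intro e
    simp only [List.mem_cons, List.not_mem_nil, or_false]
    constructor
    · intro hh
      rcases hh with h|h|h|h|h|h|h|h|h|h|h|h
      exacts [Or.inr (Or.inl h), Or.inr (Or.inr (Or.inr (Or.inr (Or.inr (Or.inr (Or.inr (h))))))), Or.inr (Or.inr (Or.inr (Or.inr (Or.inr (Or.inl h))))), Or.inr (Or.inr (Or.inl h)), Or.inr (Or.inr (Or.inr (Or.inr (Or.inr (Or.inr (Or.inl h)))))), Or.inr (Or.inr (Or.inr (Or.inr (Or.inl h)))), Or.inr (Or.inr (Or.inr (Or.inl h))), Or.inr (Or.inr (Or.inr (Or.inr (Or.inr (Or.inl h))))), Or.inr (Or.inr (Or.inr (Or.inr (Or.inr (Or.inr (Or.inr (h))))))), Or.inl h,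 Or.inr (Or.inr (Or.inr (Or.inr (Or.inl h)))), Or.inr (Or.inr (Or.inr (Or.inr (Or.inr (Or.inr (Or.inl h))))))]
    · intro hh
      rcases hh with h|h|h|h|h|h|h|h
      exacts [Or.inr (Or.inr (Or.inr (Or.inr (Or.inr (Or.inr (Or.inr (Or.inr (Or.inr (Or.inl h))))))))), Or.inl h, Or.inr (Or.inr (Or.inr (Or.inl h))), Or.inr (Or.inr (Or.inr (Or.inr (Or.inr (Or.inr (Or.inl h)))))), Or.inr (Or.inr (Or.inr (Or.inr (Or.inr (Or.inl h))))), Or.inr (Or.inr (Or.inl h)), Or.inr (Or.inr (Or.inr (Or.inr (Or.inl h)))), Or.inr (Or.inl h)]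
  exact pv_if_congr _ _ (cond_equiv u _ _ hmem) _ _

-- ===== sieve-side lemmas =====

lemma foldl_pair {α β γ : Type} (l : List γ) (f : α → γ → α) (g : β → γ → β) (a : α) (b : β) :
    l.foldl (fun st c => (f st.1 c, g st.2 c)) (a, b) = (l.foldl f a, l.foldl g b) := by
  induction l generalizing a b with
  | nil => rfl
  | cons c t ih => simp [List.foldl_cons, ih]

lemma mem_set_update {α : Type} [BEq α] [LawfulBEq α] (s : PySem.Set α) (xs : List α) (y : α) :
    y ∈ PySem.Set.update s xs ↔ y ∈ s ∨ y ∈ xs := by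
  induction xs generalizing s with
  | nil => simp [PySem.Set.update]
  | cons x t ih =>
    show y ∈ PySem.Set.update (PySem.Set.add s x) t ↔ _
    rw [ih, PySem.Set.mem_add]
    simp [List.mem_cons]
    tauto

lemma filter_beq_nodup {α : Type} [BEq α] [LawfulBEq α] (l : List α) (hn : l.Nodup) (s : α) :
    l.filter (fun e => e == s) = if s ∈ l then [s] else [] := by
  induction l with
  | nil => simp
  | cons x t ih =>
    rcases List.nodup_cons.mp hn with ⟨hx, ht⟩
    rw [List.filter_cons]
    by_cases hxs : x = s
    · subst hxs
      have h0 : t.filter (fun e => e == x) = [] :=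
        List.filter_eq_nil_iff.mpr (fun a ha hb => (hx (by rwa [eq_of_beq hb] at ha)).elim)
      simp [h0]
    · have hb : ((x == s) = true) = False := by simp [hxs]
      simp only [hb, if_false, ih ht, List.mem_cons]
      by_cases hm : s ∈ t <;> simp [hm, Ne.symm hxs]

-- index characterization: the per-key list is the ordered list of indices whose encoding set contains the key
lemma idx_getD {α : Type} (g : α → List String) (hg : ∀ a, (g a).Nodup)
    (l : List (Int × α)) (d0 : PySem.Dict String (List Int)) (s : String) :
    (l.foldl (fun idx jc =>
        (g jc.2).foldl (fun idx e => idx.modify e [] (fun l => l ++ [jc.1])) idx) d0).getD s []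
      = d0.getD s [] ++ l.flatMap (fun jc => if s ∈ g jc.2 then [jc.1] else []) := by
  induction l generalizing d0 with
  | nil => rw [List.foldl_nil, List.flatMap_nil, List.append_nil]
  | cons jc t ih =>
    rw [List.foldl_cons, List.flatMap_cons, ih]
    have hinner : ((g jc.2).foldl
        (fun idx e => idx.modify e [] (fun l => l ++ [jc.1])) d0).getD s []
        = d0.getD s [] ++ (if s ∈ g jc.2 then [jc.1] else []) := by
      have h1 : (g jc.2).foldl
          (fun idx e => idx.modify e [] (fun l => l ++ [jc.1])) d0
          = ((g jc.2).map (fun e => (e, jc.1))).foldl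
              (fun idx p => idx.modify p.1 [] (fun l => l ++ [p.2])) d0 := by
        rw [List.foldl_map]
      rw [h1, PySem.Dict.getD_foldl_modify_append]
      congr 1
      rw [List.filter_map]
      have h2 : (g jc.2).filter
          ((fun p : String × Int => p.1 == s) ∘ (fun e => (e, jc.1)))
          = if s ∈ g jc.2 then [s] else [] := by
        have h3 := filter_beq_nodup (g jc.2) (hg jc.2) s
        simpa [Function.comp] using h3
      rw [h2]
      by_cases hm : s ∈ g jc.2 <;> simp [hm]
    rw [hinner, List.append_assoc]

lemma enumerate_map {α β : Type} (f : α → β) (xs : List α) (s : Int) :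
    PySem.List.enumerate (xs.map f) s = (PySem.List.enumerate xs s).map (fun p => (p.1, f p.2)) := by
  induction xs generalizing s with
  | nil => simp [PySem.List.enumerate_nil]
  | cons x t ih => simp [PySem.List.enumerate_cons, ih]

-- main sieve invariant
set_option maxHeartbeats 1000000 in
lemma pv_main (idx : String → List Int) (l : List (Int × List (Int × Int)))
    (u : PySem.Set String) (killed : PySem.Set Int)
    (hpw : l.Pairwise (fun p q => p.1 < q.1))
    (hidx : ∀ jc ∈ l, ∀ s, (jc.1 ∈ idx s ↔ s ∈ pvE8 jc.2))
    (hinv : ∀ jc ∈ l, ((PySem.Set.contains killed jc.1 = true) ↔ ∃ e ∈ pvE8 jc.2, PySem.Set.contains u e = true)) :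
    (l.foldl (fun st : PySem.Set Int × PySem.Set String => fun jc =>
        if !(PySem.Set.contains st.1 jc.1) then
          (PySem.Set.update st.1 ((idx (pvEncB jc.2)).filter (fun j => decide (j > jc.1))),
           PySem.Set.add st.2 (pvEncB jc.2))
        else st) (killed, u)).2
      = l.foldl (fun u jc =>
          if (pvE8 jc.2).all (fun e => !(PySem.Set.contains u e)) then PySem.Set.add u (pvEncB jc.2) else u) u := by
  induction l generalizing u killed with
  | nil => rfl
  | cons jc t ih =>
    rcases List.pairwise_cons.mp hpw with ⟨hlt, hpw'⟩
    have h1 := hinv jc (List.mem_cons_self ..)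
    by_cases hk : PySem.Set.contains killed jc.1 = true
    · -- already marked: both sides skip
      have hall : ((pvE8 jc.2).all (fun e => !(PySem.Set.contains u e))) = false := by
        obtain ⟨e, he, hue⟩ := h1.mp hk
        rw [Bool.eq_false_iff]
        intro hall
        have h2 := (List.all_eq_true.mp hall) e he
        rw [hue] at h2
        simp at h2
      simp only [List.foldl_cons, hk, hall, Bool.not_true, Bool.false_eq_true, if_false]
      exact ih u killed hpw' (fun kc hkm => hidx kc (List.mem_cons_of_mem _ hkm))
        (fun kc hkm => hinv kc (List.mem_cons_of_mem _ hkm))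
    · -- keep: both sides add the representative
      have hk' : PySem.Set.contains killed jc.1 = false := Bool.eq_false_iff.mpr hk
      have hall : ((pvE8 jc.2).all (fun e => !(PySem.Set.contains u e))) = true := by
        rw [List.all_eq_true]
        intro e he
        simp only [Bool.not_eq_true']
        rcases h : PySem.Set.contains u e with _ | _
        · rfl
        · exact absurd (h1.mpr ⟨e, he, h⟩) hk
      simp only [List.foldl_cons, hk', hall, Bool.not_false, if_true]
      apply ih
      · exact hpw'
      · exact fun kc hkm => hidx kc (List.mem_cons_of_mem _ hkm)
      · intro kc hkm
        have hlt' := hlt kc hkm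
        have hidx' := hidx kc (List.mem_cons_of_mem _ hkm) (pvEncB jc.2)
        have hinv' := hinv kc (List.mem_cons_of_mem _ hkm)
        rw [PySem.Set.contains_iff, mem_set_update]
        constructor
        · intro h
          rcases h with h | h
          · obtain ⟨e, he, hue⟩ := hinv'.mp (by rw [PySem.Set.contains_iff]; exact h)
            refine ⟨e, he, ?_⟩
            rw [PySem.Set.contains_iff, PySem.Set.mem_add]
            exact Or.inl ((PySem.Set.contains_iff _ _).mp hue)
          · rw [List.mem_filter] at h
            refine ⟨pvEncB jc.2, hidx'.mp h.1, ?_⟩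
            rw [PySem.Set.contains_iff, PySem.Set.mem_add]
            exact Or.inr rfl
        · rintro ⟨e, he, hue⟩
          rw [PySem.Set.contains_iff, PySem.Set.mem_add] at hue
          rcases hue with hue | rfl
          · exact Or.inl ((PySem.Set.contains_iff _ _).mp
              (hinv'.mpr ⟨e, he, (PySem.Set.contains_iff _ _).mpr hue⟩))
          · refine Or.inr ?_
            rw [List.mem_filter]
            exact ⟨hidx'.mpr he, by simpa using hlt'⟩

-- mid as a fold over the enumeration (the index is ignored)
lemma mid_enum (ds : List (List (Int × Int))) :
    pvMid ds = (PySem.List.enumerate ds 0).foldl (fun u jc =>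
      if (pvE8 jc.2).all (fun e => !(PySem.Set.contains u e)) then PySem.Set.add u (pvEncB jc.2) else u)
      PySem.Set.empty := by
  unfold pvMid
  conv_lhs => rw [← PySem.List.map_snd_enumerate ds 0]
  rw [List.foldl_map]

def pvIdxD (ds : List (List (Int × Int))) : PySem.Dict String (List Int) :=
  (PySem.List.enumerate ds).foldl (fun idx jc =>
    (PySem.Set.ofList (pvE8 jc.2)).foldl (fun idx e => idx.modify e [] (fun l => l ++ [jc.1])) idx)
    PySem.Dict.empty

lemma idx_spec (ds : List (List (Int × Int))) (jc : Int × List (Int × Int))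
    (hjc : jc ∈ PySem.List.enumerate ds 0) (s : String) :
    jc.1 ∈ (pvIdxD ds).getD s [] ↔ s ∈ pvE8 jc.2 := by
  unfold pvIdxD
  rw [idx_getD (fun c => PySem.Set.ofList (pvE8 c)) (fun a => PySem.Set.nodup_ofList _)]
  have hemp : ((PySem.Dict.empty : PySem.Dict String (List Int)).getD s []) = [] := rfl
  rw [hemp, List.nil_append, List.mem_flatMap]
  rw [← PySem.Set.mem_ofList (xs := pvE8 jc.2)]
  constructor
  · rintro ⟨kc, hkc, hm⟩
    by_cases hs : s ∈ PySem.Set.ofList (pvE8 kc.2)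
    · rw [if_pos hs] at hm
      have heq : jc.1 = kc.1 := by simpa using hm
      rw [PySem.List.mem_enumerate_iff] at hjc hkc
      obtain ⟨k, hk, rfl⟩ := hjc
      obtain ⟨k', hk', rfl⟩ := hkc
      simp only [] at heq
      have : k = k' := by omega
      subst this
      exact hs
    · rw [if_neg hs] at hm
      simp at hm
  · intro hs
    exact ⟨jc, hjc, by rw [if_pos hs]; simp⟩

lemma st1_eq (ds : List (List (Int × Int))) :
    (PySem.List.enumerate ds).foldl
      (fun (st : List String × PySem.Dict String (List Int)) jc =>
        (st.1 ++ [pvEncB jc.2],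
         (PySem.Set.ofList (pvE8 jc.2)).foldl (fun idx e => idx.modify e [] (fun l => l ++ [jc.1])) st.2))
      ([], PySem.Dict.empty)
      = (ds.map pvEncB, pvIdxD ds) := by
  rw [foldl_pair (PySem.List.enumerate ds)
    (fun (a : List String) (jc : Int × List (Int × Int)) => a ++ [pvEncB jc.2])
    (fun (b : PySem.Dict String (List Int)) (jc : Int × List (Int × Int)) =>
      (PySem.Set.ofList (pvE8 jc.2)).foldl (fun idx e => idx.modify e [] (fun l => l ++ [jc.1])) b)]
  unfold pvIdxD
  congr 1
  rw [PySem.List.foldl_append_singleton_eq_map, List.nil_append]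
  conv_rhs => rw [← PySem.List.map_snd_enumerate ds 0]
  rw [List.map_map]
  rfl

lemma alt_eq_mid (ds : List (List (Int × Int))) :
    get_unique_decominoes_alt ds = pvMid ds := by
  show ((PySem.List.enumerate ((PySem.List.enumerate ds).foldl
      (fun (st : List String × PySem.Dict String (List Int)) jc =>
        (st.1 ++ [pvEncB jc.2],
         (PySem.Set.ofList (pvE8 jc.2)).foldl (fun idx e => idx.modify e [] (fun l => l ++ [jc.1])) st.2))
      ([], PySem.Dict.empty)).1).foldl _ (PySem.Set.empty, PySem.Set.empty)).2 = _
  rw [st1_eq]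
  rw [mid_enum]
  simp only []
  rw [enumerate_map, List.foldl_map]
  exact pv_main (fun s => (pvIdxD ds).getD s []) (PySem.List.enumerate ds 0)
    PySem.Set.empty PySem.Set.empty
    (PySem.List.pairwise_lt_enumerate ds 0)
    (fun jc hjc s => idx_spec ds jc hjc s)
    (fun jc hjc => by simp)

-- ===== VERDICT (by name: the statement is the Claim_ definition above) =====
theorem get_unique_decominoes_spec : Claim_equal_get_unique_decominoes := by
  intro ds hdom hpre
  unfold Spec_get_unique_decominoes
  rw [alt_eq_mid, A_eq_mid ds hpre]
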